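-- pv_equiv track=rewrite | github.com/alphagov/cyber-security-concourse-base-image | bin/get_actions_required.py | does_path_exist_in_changed_files
-- ===== SOURCE A (Python) =====
-- def does_path_exist_in_changed_files(action_triggers, changed_files) -> bool:
--     return any(
--         [
--             trigger
--             for trigger in action_triggers
--             if any(changed_file.startswith(trigger) for changed_file in changed_files)
--         ]
--     )
-- ===== SOURCE B (Python) =====
-- def does_path_exist_in_changed_files(action_triggers, changed_files) -> bool:
--     prefixes = set()
--     for changed_file in changed_files:
--         for i in range(1, len(changed_file) + 1):
--             prefixes.add(changed_file[:i])
--     return any(trigger in prefixes for trigger in action_triggers)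
-- ===== Notes on version B (the rewrite author's own statement) =====
-- stated objective: faster
-- what changed: B builds a hash set of all non-empty prefixes of the changed files once and answers each trigger by a single set-membership test, eliminating A's trigger-by-file startswith cross product; the empty-trigger case (which A's any() over a list of strings treats as falsy) falls out naturally since the set holds only non-empty prefixes.
import Mathlib
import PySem

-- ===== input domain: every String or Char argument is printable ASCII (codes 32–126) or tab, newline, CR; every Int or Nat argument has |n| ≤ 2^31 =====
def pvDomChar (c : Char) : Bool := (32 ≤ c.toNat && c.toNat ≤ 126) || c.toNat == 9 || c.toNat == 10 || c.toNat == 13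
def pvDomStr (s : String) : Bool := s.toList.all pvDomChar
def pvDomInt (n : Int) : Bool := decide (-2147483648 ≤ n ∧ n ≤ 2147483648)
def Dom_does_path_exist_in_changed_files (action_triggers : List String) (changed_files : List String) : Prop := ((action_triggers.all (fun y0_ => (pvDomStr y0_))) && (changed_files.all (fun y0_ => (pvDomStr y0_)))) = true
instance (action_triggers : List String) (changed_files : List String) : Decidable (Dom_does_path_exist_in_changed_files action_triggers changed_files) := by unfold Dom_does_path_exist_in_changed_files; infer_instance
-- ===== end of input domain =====

-- B builds the set of all non-empty prefixes of the changed files once and tests each trigger by a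
-- single set membership, instead of A's trigger × file startswith double scan (alternative decomposition).

-- ===== PORT A =====
-- any([...]) over a LIST OF STRINGS: Python truthiness — a string counts iff it is non-empty.
def does_path_exist_in_changed_files (action_triggers : List String) (changed_files : List String) : Bool :=
  (action_triggers.filter (fun trigger =>
      changed_files.any (fun changed_file => PySem.Str.startswith changed_file trigger))).any
    (fun trigger => !(trigger == ""))

-- ===== PORT B =====
def does_path_exist_in_changed_files_alt (action_triggers : List String) (changed_files : List String) : Bool :=
  let prefixes : PySem.Set String :=
    changed_files.foldl (fun acc changed_file =>
      (PySem.List.pyRange 1 (PySem.Str.len changed_file + 1) 1).foldl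
        (fun acc2 i => PySem.Set.add acc2 (PySem.Str.slice changed_file none (some i))) acc)
      PySem.Set.empty
  action_triggers.any (fun trigger => PySem.Set.contains prefixes trigger)

-- ===== PRECONDITION & SPEC =====
def Spec_does_path_exist_in_changed_files (action_triggers : List String) (changed_files : List String) (out : Bool) : Prop := out = does_path_exist_in_changed_files_alt action_triggers changed_files
instance (action_triggers : List String) (changed_files : List String) (out : Bool) : Decidable (Spec_does_path_exist_in_changed_files action_triggers changed_files out) := by unfold Spec_does_path_exist_in_changed_files; infer_instance

-- ===== CLAIM (what is proved, stated in full; the proofs are below) =====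
def Claim_equal_does_path_exist_in_changed_files : Prop := ∀ (action_triggers : List String) (changed_files : List String), Dom_does_path_exist_in_changed_files action_triggers changed_files → Spec_does_path_exist_in_changed_files action_triggers changed_files (does_path_exist_in_changed_files action_triggers changed_files)

-- ===== LEMMAS AND PROOFS =====

-- membership in the prefix set built by B's nested loops
theorem mem_prefix_fold (changed_files : List String) (acc : PySem.Set String) (t : String) :
    t ∈ changed_files.foldl (fun acc changed_file =>
      (PySem.List.pyRange 1 (PySem.Str.len changed_file + 1) 1).foldl
        (fun acc2 i => PySem.Set.add acc2 (PySem.Str.slice changed_file none (some i))) acc)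
      acc ↔
    t ∈ acc ∨ ∃ f ∈ changed_files, ∃ i : Int, 1 ≤ i ∧ i < PySem.Str.len f + 1 ∧
      t = PySem.Str.slice f none (some i) := by
  induction changed_files generalizing acc with
  | nil => simp
  | cons f fs ih =>
    rw [List.foldl_cons, ih, ← PySem.Set.update_map_eq_foldl_add, PySem.Set.mem_update]
    simp only [List.mem_map, PySem.List.mem_pyRange_one, List.mem_cons]
    constructor
    · rintro ((h | ⟨i, ⟨h1, h2⟩, rfl⟩) | ⟨g, hg, i, h1, h2, rfl⟩)
      · exact .inl h
      · exact .inr ⟨f, .inl rfl, i, h1, h2, rfl⟩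
      · exact .inr ⟨g, .inr hg, i, h1, h2, rfl⟩
    · rintro (h | ⟨g, (rfl | hg), i, h1, h2, rfl⟩)
      · exact .inl (.inl h)
      · exact .inl (.inr ⟨i, ⟨h1, h2⟩, rfl⟩)
      · exact .inr ⟨g, hg, i, h1, h2, rfl⟩

-- a string is a slice f[:i] with 1 ≤ i ≤ len f iff it is a non-empty prefix of f
theorem slice_char (f t : String) :
    (∃ i : Int, 1 ≤ i ∧ i < PySem.Str.len f + 1 ∧ t = PySem.Str.slice f none (some i)) ↔
    (t ≠ "" ∧ t.toList <+: f.toList) := by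
  constructor
  · rintro ⟨i, h1, h2, rfl⟩
    rw [PySem.Str.len_eq] at h2
    have h0 : (0:Int) ≤ i := by omega
    have htl : (PySem.Str.slice f none (some i)).toList = f.toList.take i.toNat := by
      rw [PySem.Str.toList_slice, PySem.Chars.slice_eq_listSlice, PySem.List.slice_to _ h0]
    constructor
    · intro he
      have : (PySem.Str.slice f none (some i)).toList = [] := by rw [he]; rfl
      rw [htl] at this
      have hlen := congrArg List.length this
      simp only [List.length_take, List.length_nil] at hlen
      omega
    · rw [htl]; exact List.take_prefix _ _
  · rintro ⟨hne, hp⟩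
    refine ⟨(t.toList.length : Int), ?_, ?_, ?_⟩
    · have : t.toList ≠ [] := by
        intro h; apply hne; rw [← String.toList_inj]; exact h
      have : 0 < t.toList.length := List.length_pos_iff.mpr this
      omega
    · have := hp.length_le
      rw [PySem.Str.len_eq]; omega
    · rw [← String.toList_inj, PySem.Str.toList_slice, PySem.Chars.slice_eq_listSlice,
        PySem.List.slice_to _ (by positivity)]
      simp only [Int.toNat_natCast]
      exact (List.prefix_iff_eq_take.mp hp)

theorem ports_agree (action_triggers changed_files : List String) :
    does_path_exist_in_changed_files action_triggers changed_files =
    does_path_exist_in_changed_files_alt action_triggers changed_files := by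
  have hA : does_path_exist_in_changed_files action_triggers changed_files = true ↔
      ∃ t ∈ action_triggers, t ≠ "" ∧ ∃ f ∈ changed_files, t.toList <+: f.toList := by
    simp only [does_path_exist_in_changed_files, List.any_eq_true, List.mem_filter,
      List.any_eq_true, PySem.Str.startswith_eq, PySem.Chars.startswith_iff,
      Bool.not_eq_eq_eq_not, Bool.not_true, beq_eq_false_iff_ne, ne_eq]
    tauto
  have hB : does_path_exist_in_changed_files_alt action_triggers changed_files = true ↔
      ∃ t ∈ action_triggers, t ≠ "" ∧ ∃ f ∈ changed_files, t.toList <+: f.toList := by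
    simp only [does_path_exist_in_changed_files_alt, List.any_eq_true,
      PySem.Set.contains_iff, mem_prefix_fold, slice_char]
    constructor
    · rintro ⟨t, ht, h | ⟨f, hf, hne, hp⟩⟩
      · simp [PySem.Set.empty] at h
      · exact ⟨t, ht, hne, f, hf, hp⟩
    · rintro ⟨t, ht, hne, f, hf, hp⟩
      exact ⟨t, ht, .inr ⟨f, hf, hne, hp⟩⟩
  have h := hA.trans hB.symm
  cases ha : does_path_exist_in_changed_files action_triggers changed_files <;>
    cases hb : does_path_exist_in_changed_files_alt action_triggers changed_files <;>
      simp_all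

-- ===== VERDICT (by name: the statement is the Claim_ definition above) =====
theorem does_path_exist_in_changed_files_spec : Claim_equal_does_path_exist_in_changed_files := by
  intro a c _
  exact ports_agree a c
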